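-- pv_equiv track=rewrite | github.com/firechecking/ArduinoKeyboard | python/SerialClient/serial_keyboard.py | decodeKeys
-- ===== SOURCE A (Python) =====
-- def decodeKeys(bytes_values):
--     """Convert bytes to keystate list
--
--     Args:
--         bytes_values: 11 bytes input get from serial keyboard
--
--     Returns:
--         A list of key states contains 'null', 'press', 'hold', ''
--
--         ['null', 'null', 'null', 'null', 'null', 'null', 'null', 'null', 'null', 'null', 'null', 'null', 'press', 'null', ...]
--     """
--     keystates = []
--     state_dic = {0: "null", 1: "press", 2: "hold", 3: "error"}
--     for i in range(len(bytes_values)):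
--         value = bytes_values[i]
--         for j in range(4):
--             state = value % 4
--             value = value // 4
--             keystates.append(state_dic[state])
--     return keystates
-- ===== SOURCE B (Python) =====
-- _LABELS = ["null", "press", "hold", "error"]
--
-- # 256-entry table built by iterated Cartesian product: after round k, _TABLE[b]
-- # is the k LSB-first base-4 digit labels of b (0 <= b < 4**k).
-- _TABLE = [[]]
-- for _ in range(4):
--     _TABLE = [[lab] + rest for rest in _TABLE for lab in _LABELS]
--
--
-- def decodeKeys(bytes_values):
--     out = []
--     for v in bytes_values:
--         out += _TABLE[v % 256]
--     return out
-- ===== Notes on version B (the rewrite author's own statement) =====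
-- stated objective: alternative
-- what changed: Replaces A's per-byte inner divmod/dict-lookup loop by a 256-entry lookup table built once via iterated Cartesian product of the label list, indexed with v % 256 (correct since the four base-4 digits of v depend only on v mod 256).
import Mathlib
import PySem

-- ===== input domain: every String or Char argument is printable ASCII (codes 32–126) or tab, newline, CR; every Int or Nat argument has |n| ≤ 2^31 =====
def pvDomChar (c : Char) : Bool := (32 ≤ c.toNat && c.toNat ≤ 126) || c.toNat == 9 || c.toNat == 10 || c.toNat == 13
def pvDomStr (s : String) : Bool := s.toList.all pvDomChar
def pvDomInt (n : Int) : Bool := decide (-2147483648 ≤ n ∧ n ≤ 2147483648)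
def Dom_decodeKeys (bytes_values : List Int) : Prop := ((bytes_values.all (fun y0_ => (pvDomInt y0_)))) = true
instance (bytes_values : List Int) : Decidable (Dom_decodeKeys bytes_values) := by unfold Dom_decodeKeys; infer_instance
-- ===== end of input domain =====

-- B replaces A's per-bit divmod/dict decoding by a 256-entry table built once by
-- iterated Cartesian product and indexed with v % 256 (objective: alternative).

-- ===== PORT A =====
-- state_dic = {0: "null", 1: "press", 2: "hold", 3: "error"}
def pvStateDic : PySem.Dict Int String :=
  ((((PySem.Dict.empty).insert 0 "null").insert 1 "press").insert 2 "hold").insert 3 "error"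

-- body of A's inner 'for j in range(4)' loop: state = value % 4; value = value // 4;
-- keystates.append(state_dic[state]) — state ∈ {0,1,2,3} so the lookup always hits
def pvInner (p : List String × Int) (_j : Int) : List String × Int :=
  let state := PySem.Int.mod p.2 4
  let value' := PySem.Int.floordiv p.2 4
  (p.1 ++ [(pvStateDic.get? state).getD ""], value')

def decodeKeys (bytes_values : List Int) : List String :=
  ((PySem.List.pyRange 0 (bytes_values.length : Int) 1).foldl
    (fun (keystates : List String) i =>
      -- value = bytes_values[i]; i ∈ range(len): always in range, so the default is never used
      ((PySem.List.pyRange 0 4 1).foldl pvInner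
        (keystates, PySem.List.pyGetD bytes_values i 0)).1)
    [])

-- ===== PORT B =====
def pvLabels : List String := ["null", "press", "hold", "error"]

-- _TABLE = [[]]; for _ in range(4): _TABLE = [[lab] + rest for rest in _TABLE for lab in _LABELS]
def pvTable : List (List String) :=
  (PySem.List.pyRange 0 4 1).foldl
    (fun T _ => T.flatMap (fun rest => pvLabels.map (fun lab => lab :: rest)))
    [[]]

def decodeKeys_alt (bytes_values : List Int) : List String :=
  bytes_values.foldl
    (fun out v => out ++ PySem.List.pyGetD pvTable (PySem.Int.mod v 256) [])
    []

-- ===== PRECONDITION & SPEC =====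
def Spec_decodeKeys (bytes_values : List Int) (out : List String) : Prop := out = decodeKeys_alt bytes_values
instance (bytes_values : List Int) (out : List String) : Decidable (Spec_decodeKeys bytes_values out) := by unfold Spec_decodeKeys; infer_instance

-- ===== CLAIM (what is proved, stated in full; the proofs are below) =====
def Claim_equal_decodeKeys : Prop := ∀ (bytes_values : List Int), Dom_decodeKeys bytes_values → Spec_decodeKeys bytes_values (decodeKeys bytes_values)

-- ===== LEMMAS AND PROOFS =====

-- the four labels A appends for one byte value, written with A's dict lookup
def pvChunkA (v : Int) : List String :=
  [(pvStateDic.get? (PySem.Int.mod v 4)).getD "",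
   (pvStateDic.get? (PySem.Int.mod (PySem.Int.floordiv v 4) 4)).getD "",
   (pvStateDic.get? (PySem.Int.mod (PySem.Int.floordiv (PySem.Int.floordiv v 4) 4) 4)).getD "",
   (pvStateDic.get? (PySem.Int.mod (PySem.Int.floordiv (PySem.Int.floordiv (PySem.Int.floordiv v 4) 4) 4) 4)).getD ""]

-- one byte of A's inner loop appends exactly pvChunkA
theorem pvInnerChunk (ks : List String) (v : Int) :
    ((PySem.List.pyRange 0 4 1).foldl pvInner (ks, v)).1 = ks ++ pvChunkA v := by
  have h4 : PySem.List.pyRange 0 4 1 = [0, 1, 2, 3] := by decide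
  rw [h4]
  simp [List.foldl, pvInner, pvChunkA]

-- B's table agrees with A's four-label chunk on every index 0..255
set_option maxRecDepth 40000 in
theorem pvTableLookup :
    ∀ r : Fin 256, PySem.List.pyGetD pvTable ((r : Nat) : Int) [] = pvChunkA (r : Nat) := by
  decide

-- A's four digits only depend on v mod 256
theorem pvStable (v : Int) : pvChunkA (PySem.Int.mod v 256) = pvChunkA v := by
  have m4 : ∀ a : Int, PySem.Int.mod a 4 = a % 4 := fun a => PySem.Int.mod_eq_emod_of_pos (by norm_num)
  have d4 : ∀ a : Int, PySem.Int.floordiv a 4 = a / 4 := fun a => PySem.Int.floordiv_eq_ediv_of_pos (by norm_num)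
  have m256 : PySem.Int.mod v 256 = v % 256 := PySem.Int.mod_eq_emod_of_pos (by norm_num)
  simp only [pvChunkA, m4, d4, m256]
  have e1 : v % 256 % 4 = v % 4 := by omega
  have e2 : v % 256 / 4 % 4 = v / 4 % 4 := by omega
  have e3 : v % 256 / 4 / 4 % 4 = v / 4 / 4 % 4 := by omega
  have e4 : v % 256 / 4 / 4 / 4 % 4 = v / 4 / 4 / 4 % 4 := by omega
  rw [e1, e2, e3, e4]

-- B's table lookup at v % 256 is A's chunk for v
theorem pvTableHit (v : Int) :
    PySem.List.pyGetD pvTable (PySem.Int.mod v 256) [] = pvChunkA v := by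
  have h0 : 0 ≤ PySem.Int.mod v 256 := PySem.Int.mod_nonneg v (by norm_num)
  have hlt : PySem.Int.mod v 256 < 256 := PySem.Int.mod_lt v (by norm_num)
  have hf : (PySem.Int.mod v 256).toNat < 256 := by omega
  have hr : PySem.Int.mod v 256 = (((PySem.Int.mod v 256).toNat : Nat) : Int) := by omega
  have hl := pvTableLookup ⟨(PySem.Int.mod v 256).toNat, hf⟩
  rw [hr, hl, ← hr, pvStable]

-- both folds over the byte list produce the same list
theorem pvFoldl_eq (bs : List Int) (acc : List String) :
    bs.foldl (fun ks v => ((PySem.List.pyRange 0 4 1).foldl pvInner (ks, v)).1) acc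
    = bs.foldl (fun out v => out ++ PySem.List.pyGetD pvTable (PySem.Int.mod v 256) []) acc := by
  induction bs generalizing acc with
  | nil => rfl
  | cons v t ih =>
      simp only [List.foldl]
      rw [pvInnerChunk, pvTableHit]
      exact ih _

-- ===== VERDICT (by name: the statement is the Claim_ definition above) =====
theorem decodeKeys_spec : Claim_equal_decodeKeys := by
  intro bs _
  unfold Spec_decodeKeys decodeKeys decodeKeys_alt
  have h := PySem.List.foldl_pyRange_zero_pyGetD' bs 0
    (fun keystates value => ((PySem.List.pyRange 0 4 1).foldl pvInner (keystates, value)).1) []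
  beta_reduce at h
  rw [h]
  exact pvFoldl_eq bs []
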